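-- pv_equiv track=rewrite | github.com/yuninje/Algorithm_Solve | Baekjoon/[ 02635 ] 수 이어가기.py | dfs
-- ===== SOURCE A (Python) =====
-- def dfs(r, c):
--     if c < r-c:
--         return 3
--     elif c == r-c:
--         return 5
--     elif c - (r-c) > r-c:
--         return 4
--     else:
--         return dfs(c,r-c)+1
-- ===== SOURCE B (Python) =====
-- def dfs(r, c):
--     count = 0
--     while True:
--         if c < r - c:
--             return count + 3
--         elif c == r - c:
--             return count + 5
--         elif c - (r - c) > r - c:
--             return count + 4
--         else:
--             r, c = c, r - c
--             count += 1
-- ===== Notes on version B (the rewrite author's own statement) =====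
-- stated objective: idiomatic
-- what changed: Replaced the tail recursion with an iterative while-loop that threads an explicit step counter, so terminal cases return count+3/5/4 instead of adding 1 per unwinding recursive frame.
import Mathlib
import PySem

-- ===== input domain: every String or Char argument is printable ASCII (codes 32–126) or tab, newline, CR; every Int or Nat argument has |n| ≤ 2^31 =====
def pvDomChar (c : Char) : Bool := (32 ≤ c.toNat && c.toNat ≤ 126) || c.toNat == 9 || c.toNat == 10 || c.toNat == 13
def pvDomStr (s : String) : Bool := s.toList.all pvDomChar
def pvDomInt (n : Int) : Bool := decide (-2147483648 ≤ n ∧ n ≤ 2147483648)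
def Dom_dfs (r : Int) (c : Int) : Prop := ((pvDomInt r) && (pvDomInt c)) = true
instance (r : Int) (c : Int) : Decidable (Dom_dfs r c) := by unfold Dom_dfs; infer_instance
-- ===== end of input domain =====

-- B rewrites A's tail recursion as an accumulator loop (same tests, count threaded); equivalence of return values is proved; no speed claim.

-- ===== PORT A =====
-- literal transliteration of A's recursion; terminates because in the
-- recursive branch 0 < r - c < c, so the first argument strictly decreases
-- while staying positive.
def dfs (r : Int) (c : Int) : Int :=
  if c < r - c then 3
  else if c = r - c then 5
  else if c - (r - c) > r - c then 4
  else dfs c (r - c) + 1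
termination_by r.toNat
decreasing_by omega

-- ===== PORT B =====
-- B's while-True loop with accumulator `count`, as tail recursion on the same state.
def dfsGo (r : Int) (c : Int) (count : Int) : Int :=
  if c < r - c then count + 3
  else if c = r - c then count + 5
  else if c - (r - c) > r - c then count + 4
  else dfsGo c (r - c) (count + 1)
termination_by r.toNat
decreasing_by omega

def dfs_alt (r : Int) (c : Int) : Int := dfsGo r c 0

-- ===== PRECONDITION & SPEC =====
def Spec_dfs (r : Int) (c : Int) (out : Int) : Prop := out = dfs_alt r c
instance (r : Int) (c : Int) (out : Int) : Decidable (Spec_dfs r c out) := by unfold Spec_dfs; infer_instance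

-- ===== CLAIM (what is proved, stated in full; the proofs are below) =====
def Claim_equal_dfs : Prop := ∀ (r : Int) (c : Int), Dom_dfs r c → Spec_dfs r c (dfs r c)

-- ===== LEMMAS AND PROOFS =====
-- The accumulator loop computes A's value shifted by the accumulator.
theorem dfsGo_eq (r c count : Int) : dfsGo r c count = dfs r c + count := by
  induction r, c, count using dfsGo.induct with
  | case1 r c count h =>
      rw [dfsGo, dfs]; simp only [if_pos h]; ring
  | case2 r c count h1 h2 =>
      rw [dfsGo, dfs]; simp only [if_neg h1, if_pos h2]; ring
  | case3 r c count h1 h2 h3 =>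
      rw [dfsGo, dfs]; simp only [if_neg h1, if_neg h2, if_pos h3]; ring
  | case4 r c count h1 h2 h3 ih =>
      rw [dfsGo, dfs]; simp only [if_neg h1, if_neg h2, if_neg h3, ih]; ring

-- ===== VERDICT (by name: the statement is the Claim_ definition above) =====
theorem dfs_spec : Claim_equal_dfs := by
  intro r c _
  unfold Spec_dfs dfs_alt
  rw [dfsGo_eq]; ring
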